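-- pv_equiv track=rewrite | github.com/brennercruvinel/neuralsemantic | python/neuralsemantic/vector/similarity_search.py | _looks_like_code
-- ===== SOURCE A (Python) =====
-- def _looks_like_code(text: str) -> bool:
--     """Detect code-like patterns."""
--     code_indicators = [
--         '()', '{}', '[]', '=>', '->', '&&', '||',
--         'function', 'def ', 'class ', 'import ',
--         'return ', 'if ', 'for ', 'while ', '===', '!=='
--     ]
--
--     text_lower = text.lower()
--     return any(indicator in text_lower for indicator in code_indicators)
-- ===== SOURCE B (Python) =====
-- # The same 16 indicators A tests for, as a tuple of patterns (shared data, not logic).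
-- CODE_INDICATORS = (
--     "()",
--     "{}",
--     "[]",
--     "=>",
--     "->",
--     "&&",
--     "||",
--     "function",
--     "def ",
--     "class ",
--     "import ",
--     "return ",
--     "if ",
--     "for ",
--     "while ",
--     "===",
--     "!==",
-- )
--
-- def _looks_like_code(text: str) -> bool:
--     """Detect code-like patterns via a single left-to-right scan of the text."""
--     t = text.lower()
--     for i in range(len(t)):
--         for ind in CODE_INDICATORS:
--             if t.startswith(ind, i):
--                 return True
--     return False
-- ===== Notes on version B (the rewrite author's own statement) =====
-- stated objective: alternative
-- what changed: A runs one full substring search over the text per indicator (pattern-major); B makes a single left-to-right pass over the text and at each position checks whether any indicator starts there (text-major, with early exit at the first hit).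
import Mathlib
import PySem

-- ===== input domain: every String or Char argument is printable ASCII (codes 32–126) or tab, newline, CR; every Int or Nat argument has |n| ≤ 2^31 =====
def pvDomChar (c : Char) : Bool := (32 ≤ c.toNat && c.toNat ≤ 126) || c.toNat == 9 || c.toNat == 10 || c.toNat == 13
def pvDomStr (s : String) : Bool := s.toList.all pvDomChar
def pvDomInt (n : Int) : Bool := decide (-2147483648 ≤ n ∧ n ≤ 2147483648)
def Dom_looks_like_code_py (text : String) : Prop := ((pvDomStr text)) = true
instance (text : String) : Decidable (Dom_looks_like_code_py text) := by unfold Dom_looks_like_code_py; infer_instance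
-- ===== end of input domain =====

-- B replaces A's per-indicator substring searches by one left-to-right scan of the
-- text checking all indicators at each position (alternative decomposition, same result).

-- ===== PORT A =====
-- A's indicator list, as in the Python source
def pvCodeIndicators : List String :=
  ["()", "{}", "[]", "=>", "->", "&&", "||",
   "function", "def ", "class ", "import ",
   "return ", "if ", "for ", "while ", "===", "!=="]

def looks_like_code_py (text : String) : Bool :=
  let text_lower := PySem.Str.lower text
  pvCodeIndicators.any (fun indicator => PySem.Str.isIn indicator text_lower)

-- ===== PORT B =====
-- B's indicator tuple, as lists of characters (Source B checks prefixes position by position)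
def pvCodeIndicatorsB : List (List Char) :=
  ["()".toList, "{}".toList, "[]".toList, "=>".toList, "->".toList, "&&".toList, "||".toList,
   "function".toList, "def ".toList, "class ".toList, "import ".toList,
   "return ".toList, "if ".toList, "for ".toList, "while ".toList, "===".toList, "!==".toList]

-- the scan over positions: at each suffix, does some indicator start here?
def pvScan : List Char → Bool
  | [] => false
  | c :: rest =>
      pvCodeIndicatorsB.any (fun p => p.isPrefixOf (c :: rest)) || pvScan rest

def looks_like_code_py_alt (text : String) : Bool :=
  pvScan (PySem.Chars.lower text.toList)

-- ===== PRECONDITION & SPEC =====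
def Spec_looks_like_code_py (text : String) (out : Bool) : Prop := out = looks_like_code_py_alt text
instance (text : String) (out : Bool) : Decidable (Spec_looks_like_code_py text out) := by unfold Spec_looks_like_code_py; infer_instance

-- ===== CLAIM (what is proved, stated in full; the proofs are below) =====
def Claim_equal_looks_like_code_py : Prop := ∀ (text : String), Dom_looks_like_code_py text → Spec_looks_like_code_py text (looks_like_code_py text)

-- ===== LEMMAS AND PROOFS =====

-- no indicator is the empty string
lemma pvIndicatorsB_ne_nil : ∀ p ∈ pvCodeIndicatorsB, p ≠ ([] : List Char) := by decide

-- the scan finds exactly the infix occurrences of some indicator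
lemma pvScan_iff_infix (cs : List Char) :
    pvScan cs = true ↔ ∃ p ∈ pvCodeIndicatorsB, p <:+: cs := by
  induction cs with
  | nil =>
      simp only [pvScan]
      constructor
      · intro h; exact absurd h (by simp)
      · rintro ⟨p, hp, hinf⟩
        exact absurd (List.eq_nil_of_infix_nil hinf) (pvIndicatorsB_ne_nil p hp)
  | cons c rest ih =>
      simp only [pvScan, Bool.or_eq_true, List.any_eq_true, ih]
      constructor
      · rintro (⟨p, hp, hpre⟩ | ⟨p, hp, hinf⟩)
        · exact ⟨p, hp, (List.infix_cons_iff).2 (Or.inl (List.isPrefixOf_iff_prefix.1 hpre))⟩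
        · exact ⟨p, hp, (List.infix_cons_iff).2 (Or.inr hinf)⟩
      · rintro ⟨p, hp, hinf⟩
        rcases (List.infix_cons_iff).1 hinf with h | h
        · exact Or.inl ⟨p, hp, List.isPrefixOf_iff_prefix.2 h⟩
        · exact Or.inr ⟨p, hp, h⟩

-- B's indicator lists are A's indicator strings, character for character
lemma pvIndicatorsB_eq_map : pvCodeIndicatorsB = pvCodeIndicators.map String.toList := rfl

-- ===== VERDICT (by name: the statement is the Claim_ definition above) =====
theorem looks_like_code_py_spec : Claim_equal_looks_like_code_py := by
  intro text _
  unfold Spec_looks_like_code_py looks_like_code_py looks_like_code_py_alt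
  rw [Bool.eq_iff_iff]
  rw [pvScan_iff_infix, pvIndicatorsB_eq_map]
  simp only [List.any_eq_true, List.mem_map, PySem.Str.isIn_iff_infix, PySem.Str.toList_lower]
  constructor
  · rintro ⟨ind, hind, hinf⟩; exact ⟨ind.toList, ⟨ind, hind, rfl⟩, hinf⟩
  · rintro ⟨p, ⟨ind, hind, rfl⟩, hinf⟩; exact ⟨ind, hind, hinf⟩
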